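-- pv_equiv track=rewrite | github.com/antlarr/bard | bard/musicbrainz_database.py | mediumlist_to_string
-- ===== SOURCE A (Python) =====
-- def mediumlist_to_string(mediumlist):
--     r = []
--     format_name = None
--     num = 0
--     for medium in mediumlist:
--         if medium['format_name'] != format_name:
--             if num > 1:
--                 r.append(f'{num}x{format_name}')
--             elif num == 1:
--                 r.append(format_name)
--             num = 0
--             format_name = medium['format_name']
--         num += 1
--
--     if num > 1:
--         r.append(f'{num}x{format_name}')
--     elif num == 1:
--         r.append(format_name)
--
--     return '+'.join(r)
-- ===== SOURCE B (Python) =====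
-- def mediumlist_to_string(mediumlist):
--     names = [m['format_name'] for m in mediumlist]
--     parts = []
--     while names:
--         head = names[0]
--         k = 1
--         while k < len(names) and names[k] == head:
--             k += 1
--         parts.append(head if k == 1 else f'{k}x{head}')
--         names = names[k:]
--     return '+'.join(parts)
-- ===== Notes on version B (the rewrite author's own statement) =====
-- stated objective: alternative
-- what changed: B first projects the format-name list, then run-length encodes it by splitting off whole runs with a two-pointer scan (head + leading-equal count, then slice past the run), instead of A's single pass with a previous-value/counter state and a duplicated trailing flush.
import Mathlib
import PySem

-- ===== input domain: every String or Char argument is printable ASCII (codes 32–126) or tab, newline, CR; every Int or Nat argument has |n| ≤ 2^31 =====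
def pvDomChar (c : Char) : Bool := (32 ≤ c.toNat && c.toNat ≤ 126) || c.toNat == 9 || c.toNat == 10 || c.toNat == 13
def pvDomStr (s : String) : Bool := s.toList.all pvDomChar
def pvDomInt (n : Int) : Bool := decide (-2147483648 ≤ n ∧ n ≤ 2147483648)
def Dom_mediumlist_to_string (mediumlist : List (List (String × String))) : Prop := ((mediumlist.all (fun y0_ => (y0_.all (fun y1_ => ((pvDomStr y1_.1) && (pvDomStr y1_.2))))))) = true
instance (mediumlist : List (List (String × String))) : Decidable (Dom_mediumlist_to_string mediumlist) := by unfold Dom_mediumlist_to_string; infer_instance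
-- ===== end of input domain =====

-- B replaces A's previous-value/counter pass (with its duplicated trailing flush) by
-- projecting the name list and splitting off whole runs with a leading-equal count; alternative decomposition, same cost.

-- ===== PORT A =====
-- f'{format_name}' when format_name is None prints "None" (unreachable while num ≥ 1, kept for fidelity)
def pvFmt : Option String → String
  | none => "None"
  | some s => s

-- the flush performed both inside the loop and after it
def pvFlush (r : List String) (format_name : Option String) (num : Int) : List String :=
  if num > 1 then r ++ [PySem.Int.toStr num ++ "x" ++ pvFmt format_name]
  else if num = 1 then r ++ [pvFmt format_name]
  else r

def mediumlist_to_string (mediumlist : List (List (String × String))) : String :=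
  -- medium['format_name']: KeyError (excluded by Pre_) modelled by the "" default
  let st := mediumlist.foldl
    (fun (st : List String × Option String × Int) medium =>
      let (r, format_name, num) := st
      let mname := ((PySem.Dict.mk medium).get? "format_name").getD ""
      if some mname ≠ format_name then
        (pvFlush r format_name num, some mname, (0 : Int) + 1)
      else
        (r, format_name, num + 1))
    ([], none, (0 : Int))
  PySem.Str.join "+" (pvFlush st.1 st.2.1 st.2.2)

-- ===== PORT B =====
-- inner while: number of leading elements of the tail equal to head
def pvRunLen (head : String) : List String → Nat
  | [] => 0
  | x :: xs => if x = head then 1 + pvRunLen head xs else 0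

-- outer while: split off one run, emit its part, continue past it
def pvRuns : List String → List String
  | [] => []
  | head :: rest =>
    let k : Nat := 1 + pvRunLen head rest
    (if k = 1 then head else PySem.Int.toStr (k : Int) ++ "x" ++ head) ::
      pvRuns (rest.drop (pvRunLen head rest))
termination_by names => names.length
decreasing_by
  simp only [List.length_drop, List.length_cons]
  omega

def mediumlist_to_string_alt (mediumlist : List (List (String × String))) : String :=
  PySem.Str.join "+"
    (pvRuns (mediumlist.map (fun m => ((PySem.Dict.mk m).get? "format_name").getD "")))

-- ===== PRECONDITION & SPEC =====
-- Pre_ excludes exactly the inputs where Python A raises KeyError: a medium without a 'format_name' key.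
def Pre_mediumlist_to_string (mediumlist : List (List (String × String))) : Prop :=
  ∀ m ∈ mediumlist, ((PySem.Dict.mk m).get? "format_name").isSome
instance (mediumlist : List (List (String × String))) : Decidable (Pre_mediumlist_to_string mediumlist) := by unfold Pre_mediumlist_to_string; infer_instance

def pvWitness_mediumlist_to_string : (List (List (String × String))) :=
  [[("format_name", "CD")], [("format_name", "CD")], [("format_name", "DVD")]]

def Spec_mediumlist_to_string (mediumlist : List (List (String × String))) (out : String) : Prop := out = mediumlist_to_string_alt mediumlist
instance (mediumlist : List (List (String × String))) (out : String) : Decidable (Spec_mediumlist_to_string mediumlist out) := by unfold Spec_mediumlist_to_string; infer_instance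

-- ===== CLAIM (what is proved, stated in full; the proofs are below) =====
def Claim_equal_mediumlist_to_string : Prop := ∀ (mediumlist : List (List (String × String))), Dom_mediumlist_to_string mediumlist → Pre_mediumlist_to_string mediumlist → Spec_mediumlist_to_string mediumlist (mediumlist_to_string mediumlist)

-- ===== LEMMAS AND PROOFS =====

theorem pvRuns_nil : pvRuns [] = [] := by rw [pvRuns.eq_def]

theorem pvRuns_cons (head : String) (rest : List String) :
    pvRuns (head :: rest)
      = (if 1 + pvRunLen head rest = 1 then head
         else PySem.Int.toStr ((1 + pvRunLen head rest : Nat) : Int) ++ "x" ++ head) ::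
          pvRuns (rest.drop (pvRunLen head rest)) := by
  rw [pvRuns.eq_def]

def pvStep (st : List String × Option String × Int) (mname : String) : List String × Option String × Int :=
  if some mname ≠ st.2.1 then (pvFlush st.1 st.2.1 st.2.2, some mname, (0 : Int) + 1)
  else (st.1, st.2.1, st.2.2 + 1)

-- run-length parts of `names` assuming a current open run of `num` copies of `f`
def pvRunsFrom (f : String) (num : Int) : List String → List String
  | [] => pvFlush [] (some f) num
  | x :: xs => if x = f then pvRunsFrom f (num + 1) xs
               else pvFlush [] (some f) num ++ pvRunsFrom x 1 xs

theorem pvFoldl_step (names : List String) :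
    ∀ (r : List String) (f : String) (num : Int),
      (let st := names.foldl pvStep (r, some f, num); pvFlush st.1 st.2.1 st.2.2)
        = r ++ pvRunsFrom f num names := by
  induction names with
  | nil =>
    intro r f num
    simp only [List.foldl_nil, pvRunsFrom, pvFlush]
    split_ifs <;> simp
  | cons x xs ih =>
    intro r f num
    by_cases hx : x = f
    · subst hx
      have hstep : pvStep (r, some x, num) x = (r, some x, num + 1) := by
        simp [pvStep]
      simp only [List.foldl_cons, hstep, pvRunsFrom, if_true]
      exact ih r x (num + 1)
    · have hstep : pvStep (r, some f, num) x = (pvFlush r (some f) num, some x, (0 : Int) + 1) := by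
        simp [pvStep, hx]
      have hfl : pvFlush r (some f) num = r ++ pvFlush [] (some f) num := by
        simp only [pvFlush]; split_ifs <;> simp
      simp only [List.foldl_cons, hstep, pvRunsFrom, if_neg hx, hfl, zero_add]
      rw [ih (r ++ pvFlush [] (some f) num) x 1]
      simp

theorem pvRunsFrom_eq_runs (names : List String) :
    ∀ (f : String) (num : Int), 1 ≤ num →
      pvRunsFrom f num names
        = (if num + (pvRunLen f names : Int) = 1 then f
           else PySem.Int.toStr (num + (pvRunLen f names : Int)) ++ "x" ++ f)
            :: pvRuns (names.drop (pvRunLen f names)) := by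
  induction names with
  | nil =>
    intro f num h
    simp only [pvRunsFrom, pvRunLen, List.drop_nil, pvRuns_nil, Nat.cast_zero, add_zero,
      pvFlush, pvFmt]
    split_ifs with h1 h2 <;> first | (exfalso; omega) | simp
  | cons x xs ih =>
    intro f num h
    by_cases hx : x = f
    · subst hx
      simp only [pvRunsFrom, pvRunLen, if_true]
      rw [ih x (num + 1) (by omega)]
      have hd : ((1 + pvRunLen x xs : Nat) : Int) = 1 + (pvRunLen x xs : Int) := by push_cast; ring
      have hdrop : (x :: xs).drop (1 + pvRunLen x xs) = xs.drop (pvRunLen x xs) := by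
        simp [Nat.add_comm]
      rw [hdrop, hd]
      congr 2 <;> ring_nf
    · simp only [pvRunsFrom, pvRunLen, if_neg hx]
      have hflush : pvFlush [] (some f) num
          = [if num = 1 then f else PySem.Int.toStr num ++ "x" ++ f] := by
        simp only [pvFlush, pvFmt]
        split_ifs with h1 h2 <;> first | (exfalso; omega) | simp
      have htail : pvRunsFrom x 1 xs = pvRuns (x :: xs) := by
        rw [ih x 1 (by omega), pvRuns_cons]
        have hc : ((1 + pvRunLen x xs : Nat) : Int) = 1 + (pvRunLen x xs : Int) := by
          push_cast; ring
        rw [hc]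
        congr 1
        split_ifs with h1 h2 h2 <;> first | rfl | omega
      rw [hflush, htail]
      simp

theorem foldl_step_eq (mediumlist : List (List (String × String))) (st₀ : List String × Option String × Int) :
    mediumlist.foldl
      (fun (st : List String × Option String × Int) medium =>
        let (r, format_name, num) := st
        let mname := ((PySem.Dict.mk medium).get? "format_name").getD ""
        if some mname ≠ format_name then
          (pvFlush r format_name num, some mname, (0 : Int) + 1)
        else
          (r, format_name, num + 1))
      st₀
    = (mediumlist.map (fun m => ((PySem.Dict.mk m).get? "format_name").getD "")).foldl pvStep st₀ := by
  rw [List.foldl_map]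
  induction mediumlist generalizing st₀ with
  | nil => rfl
  | cons m ms ih =>
    simp only [List.foldl_cons]
    rw [ih]
    rfl

-- ===== VERDICT (by name: the statement is the Claim_ definition above) =====
theorem mediumlist_to_string_spec : Claim_equal_mediumlist_to_string := by
  intro mediumlist _hdom _hpre
  unfold Spec_mediumlist_to_string mediumlist_to_string mediumlist_to_string_alt
  rw [foldl_step_eq]
  set names := mediumlist.map (fun m => ((PySem.Dict.mk m).get? "format_name").getD "") with hn
  clear_value names
  cases names with
  | nil => simp [pvFlush, pvRuns_nil]
  | cons x xs =>
    have hstep : pvStep ([], none, (0 : Int)) x = ([], some x, 1) := by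
      simp [pvStep, pvFlush]
    simp only [List.foldl_cons, hstep]
    have h1 := pvFoldl_step xs [] x 1
    simp only at h1
    rw [h1]
    rw [pvRunsFrom_eq_runs xs x 1 (by omega)]
    rw [pvRuns_cons]
    simp only [List.nil_append]
    congr 2
    have hc : ((1 + pvRunLen x xs : Nat) : Int) = 1 + (pvRunLen x xs : Int) := by push_cast; ring
    rw [hc]
    exact if_congr (by omega) rfl rfl
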